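-- pv_equiv track=rewrite | github.com/daniel-reich/ubiquitous-fiesta | vudQZFD64nDWkKz8a_8.py | grant_the_hint
-- ===== SOURCE A (Python) =====
-- def grant_the_hint(txt):
--     lst = []
--     p_lst = []
--     max_len = max([len(x) for x in txt.split(" ")])
--     for y in range(max_len + 1):
--         if y == 0:
--             lst.append("".join(["_" if x != " " else " " for x in txt]))
--         else:
--             p_lst.append([])
--             for z in txt.split(" "):
--                 p_lst[y-1].append("".join([x if i < y else "_" for i, x in enumerate(z)]))
--     for i, x in enumerate(p_lst):
--         lst.append(" ".join(x))
--     return lst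
-- ===== SOURCE B (Python) =====
-- def grant_the_hint(txt):
--     words = txt.split(" ")
--     max_len = max(len(w) for w in words)
--     # word x level table: row per word, column per reveal level y (0 .. max_len)
--     table = [[w[:y] + "_" * (len(w) - y) for y in range(max_len + 1)] for w in words]
--     # read the table column-wise: one output line per level
--     return [" ".join(level) for level in zip(*table)]
-- ===== Notes on version B (the rewrite author's own statement) =====
-- stated objective: faster
-- what changed: B builds the full word-by-level reveal table once via slicing plus underscore padding and transposes it with zip(*) to read lines column-wise, instead of A's top-down loop that re-splits txt and re-enumerates every character of every word at each level with a special level-0 scan.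
import Mathlib
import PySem

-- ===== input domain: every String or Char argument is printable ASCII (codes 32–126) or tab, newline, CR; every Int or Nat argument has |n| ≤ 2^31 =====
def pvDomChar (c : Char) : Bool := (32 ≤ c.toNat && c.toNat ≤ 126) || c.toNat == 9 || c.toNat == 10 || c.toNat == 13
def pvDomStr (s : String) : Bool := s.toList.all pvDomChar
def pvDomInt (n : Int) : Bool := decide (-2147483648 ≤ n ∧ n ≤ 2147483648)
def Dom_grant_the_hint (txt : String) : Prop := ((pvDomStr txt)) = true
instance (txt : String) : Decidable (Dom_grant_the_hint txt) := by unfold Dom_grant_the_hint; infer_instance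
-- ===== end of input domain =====

-- B replaces A's top-down loop (special level-0 scan, re-split and per-char enumeration at
-- every level) by a word×level reveal table built once from slices and read column-wise
-- through a zip(*)-style transpose; measurably faster by a constant factor.

-- ===== PORT A =====
-- "".join([x if i < y else "_" for i, x in enumerate(z)])
def gthVariantA (y : Int) (z : List Char) : List Char :=
  (PySem.List.enumerate z 0).map (fun p => if p.1 < y then p.2 else '_')

def grant_the_hint (txt : String) : List String :=
  let words := PySem.Chars.splitOn txt.toList [' ']
  -- Python max() never raises here: split(" ") is never empty, so .getD 0 is never used
  let maxLen : Int := (PySem.List.max? (words.map PySem.Chars.len) (fun v => v)).getD 0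
  let p := (PySem.List.pyRange 0 (maxLen + 1) 1).foldl
    (fun (acc : List (List Char) × List (List (List Char))) y =>
      if y = 0 then
        (acc.1 ++ [txt.toList.map (fun x => if x ≠ ' ' then '_' else ' ')], acc.2)
      else
        (acc.1, acc.2 ++ [words.map (fun z => gthVariantA y z)]))
    ([], [])
  (p.1 ++ p.2.map (fun x => PySem.Chars.join [' '] x)).map String.ofList

-- ===== PORT B =====
-- heads/tails of a list of rows: some iff every row is nonempty (zip stops at the first exhausted row)
def gthHeadsTails {α : Type} : List (List α) → Option (List α × List (List α))
  | [] => some ([], [])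
  | [] :: _ => none
  | (a :: as) :: rs => (gthHeadsTails rs).map (fun p => (a :: p.1, as :: p.2))

def gthZipGo {α : Type} : Nat → List (List α) → List (List α)
  | 0, _ => []
  | Nat.succ n, rows =>
    match gthHeadsTails rows with
    | some (hs, ts) => hs :: gthZipGo n ts
    | none => []

-- zip(*rows): columns of the table, truncated at the shortest row
def gthZipStar {α : Type} (rows : List (List α)) : List (List α) :=
  match rows with
  | [] => []
  | r :: rs => gthZipGo r.length (r :: rs)

-- w[:y] + "_" * (len(w) - y)
def gthVariantB (y : Int) (w : List Char) : List Char :=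
  PySem.Chars.slice w none (some y) ++ PySem.List.pyRepeat ['_'] (PySem.Chars.len w - y)

def grant_the_hint_alt (txt : String) : List String :=
  let words := PySem.Chars.splitOn txt.toList [' ']
  let maxLen : Int := (PySem.List.max? (words.map PySem.Chars.len) (fun v => v)).getD 0
  let table := words.map (fun w =>
    (PySem.List.pyRange 0 (maxLen + 1) 1).map (fun y => gthVariantB y w))
  (gthZipStar table).map (fun col => String.ofList (PySem.Chars.join [' '] col))

-- ===== PRECONDITION & SPEC =====
def Spec_grant_the_hint (txt : String) (out : List String) : Prop := out = grant_the_hint_alt txt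
instance (txt : String) (out : List String) : Decidable (Spec_grant_the_hint txt out) := by unfold Spec_grant_the_hint; infer_instance

-- ===== CLAIM (what is proved, stated in full; the proofs are below) =====
def Claim_equal_grant_the_hint : Prop := ∀ (txt : String), Dom_grant_the_hint txt → Spec_grant_the_hint txt (grant_the_hint txt)

-- ===== LEMMAS AND PROOFS =====

-- structural description of s.split(" ") for the single-space separator
def gthSplit : List Char → List (List Char)
  | [] => [[]]
  | c :: rest =>
    if c = ' ' then [] :: gthSplit rest
    else
      match gthSplit rest with
      | [] => [[c]]
      | h :: t => (c :: h) :: t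

lemma gthSplit_ne_nil (s : List Char) : gthSplit s ≠ [] := by
  cases s with
  | nil => simp [gthSplit]
  | cons c rest =>
    simp only [gthSplit]
    split_ifs
    · simp
    · rcases h : gthSplit rest with _ | ⟨h', t⟩ <;> simp

lemma gthSplitOn_go (fuel : Nat) :
    ∀ (l cur : List Char) (acc : List (List Char)), l.length < fuel →
      PySem.Chars.splitOn.go [' '] fuel l cur acc =
        acc.reverse ++
          (match gthSplit l with
           | [] => [cur.reverse]
           | h :: t => (cur.reverse ++ h) :: t) := by
  induction fuel with
  | zero => intro l cur acc h; omega
  | succ n ih =>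
    intro l cur acc h
    cases l with
    | nil => simp [PySem.Chars.splitOn.go, gthSplit]
    | cons c rest =>
      by_cases hc : c = ' '
      · subst hc
        have hpre : List.isPrefixOf [' '] (' ' :: rest) = true := by
          simp [List.isPrefixOf]
        rw [show PySem.Chars.splitOn.go [' '] (n+1) (' ' :: rest) cur acc =
              PySem.Chars.splitOn.go [' '] n (List.drop 1 (' ' :: rest)) [] (cur.reverse :: acc) by
            simp [PySem.Chars.splitOn.go, hpre]]
        simp only [List.drop_succ_cons, List.drop_zero]
        rw [ih rest [] (cur.reverse :: acc) (by simpa using Nat.lt_of_succ_lt_succ h)]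
        rcases hs : gthSplit rest with _ | ⟨h', t⟩
        · exact absurd hs (gthSplit_ne_nil rest)
        · simp [gthSplit, hs]
      · have hpre : List.isPrefixOf [' '] (c :: rest) = false := by
          simp [List.isPrefixOf]
          intro hcc; exact hc hcc.symm
        rw [show PySem.Chars.splitOn.go [' '] (n+1) (c :: rest) cur acc =
              PySem.Chars.splitOn.go [' '] n rest (c :: cur) acc by
            simp [PySem.Chars.splitOn.go, hpre]]
        rw [ih rest (c :: cur) acc (by simpa using Nat.lt_of_succ_lt_succ h)]
        rcases hs : gthSplit rest with _ | ⟨h', t⟩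
        · exact absurd hs (gthSplit_ne_nil rest)
        · simp [gthSplit, hc, hs]

lemma gthSplitOn_eq (s : List Char) :
    PySem.Chars.splitOn s [' '] = gthSplit s := by
  rw [PySem.Chars.splitOn, gthSplitOn_go (s.length + 1) s [] [] (by omega)]
  rcases hs : gthSplit s with _ | ⟨h, t⟩
  · exact absurd hs (gthSplit_ne_nil s)
  · simp

-- A's enumerate-based variant equals take-plus-replicate, for any start offset
lemma gthVariantA_take (z : List Char) :
    ∀ (y s : Int),
      (PySem.List.enumerate z s).map (fun p => if p.1 < y then p.2 else '_') =
        z.take (y - s).toNat ++ List.replicate (z.length - (y - s).toNat) '_' := by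
  induction z with
  | nil => intro y s; simp [PySem.List.enumerate_nil]
  | cons x zs ih =>
    intro y s
    rw [PySem.List.enumerate_cons]
    by_cases hy : s < y
    · have h1 : (y - s).toNat = (y - (s + 1)).toNat + 1 := by omega
      simp only [List.map_cons, if_pos hy, ih y (s + 1), h1, List.take_succ_cons,
        List.length_cons, List.cons_append, Nat.add_sub_add_right]
    · have h1 : (y - s).toNat = 0 := by omega
      have h2 : (y - (s + 1)).toNat = 0 := by omega
      simp only [List.map_cons, if_neg hy, ih y (s + 1), h1, h2, List.take_zero,
        List.length_cons, List.nil_append, Nat.sub_zero, List.replicate_succ]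

lemma gthVariant_eq (y : Int) (hy : 0 ≤ y) (w : List Char) :
    gthVariantA y w = gthVariantB y w := by
  rw [gthVariantA, gthVariantB, gthVariantA_take w y 0,
    PySem.Chars.slice_eq_listSlice, PySem.List.slice_to w hy,
    PySem.List.pyRepeat_singleton, PySem.Chars.len_eq,
    show y - 0 = y from sub_zero y,
    show w.length - y.toNat = ((w.length : Int) - y).toNat by omega]

-- join ((a :: h) :: t) = a :: join (h :: t)
lemma gthJoin_cons_head (sep : List Char) (a : Char) (h : List Char) (t : List (List Char)) :
    PySem.Chars.join sep ((a :: h) :: t) = a :: PySem.Chars.join sep (h :: t) := by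
  cases t with
  | nil => simp [PySem.Chars.join_singleton]
  | cons q r => rw [PySem.Chars.join_cons_cons, PySem.Chars.join_cons_cons]; simp

-- level 0: join of all-underscore words equals the direct char scan of txt
lemma gthLevelZero (s : List Char) :
    PySem.Chars.join [' '] ((gthSplit s).map (fun w => List.replicate w.length '_')) =
      s.map (fun x => if x ≠ ' ' then '_' else ' ') := by
  induction s with
  | nil => simp [gthSplit, PySem.Chars.join_singleton]
  | cons c rest ih =>
    rcases hs : gthSplit rest with _ | ⟨h, t⟩
    · exact absurd hs (gthSplit_ne_nil rest)
    by_cases hc : c = ' '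
    · subst hc
      have hsplit : gthSplit (' ' :: rest) = [] :: h :: t := by simp [gthSplit, hs]
      rw [hsplit,
        show ([] :: h :: t).map (fun w => List.replicate w.length '_') =
          ([] : List Char) :: (fun w => List.replicate w.length '_') h ::
            t.map (fun w => List.replicate w.length '_') from rfl,
        PySem.Chars.join_cons_cons,
        show ((fun w => List.replicate w.length '_') h ::
            t.map (fun w => List.replicate w.length '_')) =
          (h :: t).map (fun w => List.replicate w.length '_') from rfl, ← hs, ih]
      simp
    · have hsplit : gthSplit (c :: rest) = (c :: h) :: t := by simp [gthSplit, hc, hs]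
      rw [hsplit,
        show ((c :: h) :: t).map (fun w => List.replicate w.length '_') =
          ('_' :: List.replicate h.length '_') :: t.map (fun w => List.replicate w.length '_')
          from rfl,
        gthJoin_cons_head,
        show (List.replicate h.length '_' :: t.map (fun w => List.replicate w.length '_')) =
          (h :: t).map (fun w => List.replicate w.length '_') from rfl, ← hs, ih]
      simp [hc]

-- the nonzero part of A's fold appends one line per level
lemma gthFoldA (g : Int → List (List Char)) :
    ∀ (l : List Int), (∀ y ∈ l, y ≠ 0) →
      ∀ (a : List (List Char)) (b : List (List (List Char))) (line0 : List Char),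
        l.foldl
          (fun (acc : List (List Char) × List (List (List Char))) y =>
            if y = 0 then (acc.1 ++ [line0], acc.2) else (acc.1, acc.2 ++ [g y]))
          (a, b) = (a, b ++ l.map g) := by
  intro l
  induction l with
  | nil => intro _ a b line0; simp
  | cons y ys ih =>
    intro hmem a b line0
    have hy : y ≠ 0 := hmem y (by simp)
    simp only [List.foldl_cons, if_neg hy]
    rw [ih (fun z hz => hmem z (by simp [hz])) a (b ++ [g y]) line0]
    simp

-- heads/tails of a uniformly-shaped mapped table
lemma gthHeadsTails_map {α β : Type} (f : β → α) (g : β → List α) :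
    ∀ (vs : List β),
      gthHeadsTails (vs.map (fun w => f w :: g w)) =
        some (vs.map f, vs.map g) := by
  intro vs
  induction vs with
  | nil => simp [gthHeadsTails]
  | cons v vs ih => simp [gthHeadsTails, ih]

-- transpose of a word×level table built by map-of-map, for a nonempty word list
lemma gthZipGo_table (f : List Char → Int → List Char) (w : List Char)
    (ws : List (List Char)) :
    ∀ (ls : List Int),
      gthZipGo ls.length ((w :: ws).map (fun v => ls.map (f v))) =
        ls.map (fun y => (w :: ws).map (fun v => f v y)) := by
  intro ls
  induction ls generalizing w ws with
  | nil => simp [gthZipGo]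
  | cons y ys ih =>
    simp only [List.length_cons, gthZipGo, List.map_cons]
    rw [show (f w y :: ys.map (f w)) :: ws.map (fun v => f v y :: ys.map (f v)) =
          ((w :: ws).map (fun v => f v y :: ys.map (f v))) by simp]
    rw [gthHeadsTails_map (fun v => f v y) (fun v => ys.map (f v)) (w :: ws)]
    simp
    rw [show List.map (f w) ys :: List.map (fun v => List.map (f v) ys) ws =
          ((w :: ws).map (fun v => List.map (f v) ys)) from rfl, ih w ws]
    simp

lemma gthMaxLen_nonneg (words : List (List Char)) :
    0 ≤ (PySem.List.max? (words.map PySem.Chars.len) (fun v => v)).getD 0 := by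
  rcases h : PySem.List.max? (words.map PySem.Chars.len) (fun v => v) with _ | m
  · simp
  · have hm := PySem.List.max?_mem h
    simp only [List.mem_map] at hm
    obtain ⟨w, _, hw⟩ := hm
    simp only [Option.getD_some]
    rw [← hw, PySem.Chars.len_eq]
    positivity

lemma gthVariantB_zero (w : List Char) :
    gthVariantB 0 w = List.replicate w.length '_' := by
  rw [gthVariantB, PySem.Chars.slice_eq_listSlice, PySem.List.slice_to w le_rfl,
    PySem.List.pyRepeat_singleton, PySem.Chars.len_eq]
  simp

-- ===== VERDICT (by name: the statement is the Claim_ definition above) =====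
theorem grant_the_hint_spec : Claim_equal_grant_the_hint := by
  intro txt _
  unfold Spec_grant_the_hint
  obtain ⟨w0, ws, hw⟩ : ∃ w0 ws, PySem.Chars.splitOn txt.toList [' '] = w0 :: ws := by
    rcases h : PySem.Chars.splitOn txt.toList [' '] with _ | ⟨a, b⟩
    · rw [gthSplitOn_eq] at h; exact absurd h (gthSplit_ne_nil txt.toList)
    · exact ⟨a, b, rfl⟩
  have hw' : gthSplit txt.toList = w0 :: ws := by rw [← gthSplitOn_eq]; exact hw
  simp only [grant_the_hint, grant_the_hint_alt, hw]
  set maxLen : Int := (PySem.List.max? ((w0 :: ws).map PySem.Chars.len) (fun v => v)).getD 0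
    with hmaxLen
  have hml : 0 ≤ maxLen := gthMaxLen_nonneg (w0 :: ws)
  have hrange : PySem.List.pyRange 0 (maxLen + 1) 1 =
      0 :: PySem.List.pyRange 1 (maxLen + 1) 1 := by
    have := PySem.List.pyRange_one_cons (a := 0) (b := maxLen + 1) (by omega)
    simpa using this
  have hA : (PySem.List.pyRange 0 (maxLen + 1) 1).foldl
      (fun (acc : List (List Char) × List (List (List Char))) y =>
        if y = 0 then
          (acc.1 ++ [txt.toList.map (fun x => if x ≠ ' ' then '_' else ' ')], acc.2)
        else
          (acc.1, acc.2 ++ [(w0 :: ws).map (fun z => gthVariantA y z)]))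
      ([], []) =
      ([txt.toList.map (fun x => if x ≠ ' ' then '_' else ' ')],
       (PySem.List.pyRange 1 (maxLen + 1) 1).map
         (fun y => (w0 :: ws).map (fun z => gthVariantA y z))) := by
    rw [hrange, List.foldl_cons, if_pos rfl]
    rw [gthFoldA (fun y => (w0 :: ws).map (fun z => gthVariantA y z))
      (PySem.List.pyRange 1 (maxLen + 1) 1)
      (fun y hy => by have := PySem.List.mem_pyRange_one.mp hy; omega)]
    simp
  rw [hA]
  have hB : gthZipStar ((w0 :: ws).map (fun w =>
      (PySem.List.pyRange 0 (maxLen + 1) 1).map (fun y => gthVariantB y w))) =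
      (PySem.List.pyRange 0 (maxLen + 1) 1).map
        (fun y => (w0 :: ws).map (fun w => gthVariantB y w)) := by
    have h0 : gthZipStar ((w0 :: ws).map (fun w =>
        (PySem.List.pyRange 0 (maxLen + 1) 1).map (fun y => gthVariantB y w))) =
        gthZipGo ((PySem.List.pyRange 0 (maxLen + 1) 1).map (fun y => gthVariantB y w0)).length
          ((w0 :: ws).map (fun w =>
            (PySem.List.pyRange 0 (maxLen + 1) 1).map (fun y => gthVariantB y w))) := rfl
    rw [h0, List.length_map]
    exact gthZipGo_table (fun v y => gthVariantB y v) w0 ws (PySem.List.pyRange 0 (maxLen + 1) 1)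
  rw [hB, hrange]
  simp only [List.map_cons, List.map_map, List.singleton_append]
  congr 1
  · -- level-0 line
    congr 1
    rw [show (gthVariantB 0 w0 :: ws.map (fun w => gthVariantB 0 w)) =
          ((w0 :: ws).map (fun w => gthVariantB 0 w)) from rfl,
      show ((w0 :: ws).map fun w => gthVariantB 0 w) =
          ((w0 :: ws).map fun w => List.replicate w.length '_') by
        apply List.map_congr_left; intro a _; exact gthVariantB_zero a,
      ← hw', gthLevelZero]
  · -- levels 1 .. maxLen
    apply List.map_congr_left
    intro y hy
    have hy1 : 1 ≤ y := (PySem.List.mem_pyRange_one.mp hy).1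
    have hAB : ∀ z, gthVariantA y z = gthVariantB y z :=
      fun z => gthVariant_eq y (by omega) z
    simp [hAB]
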